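-- pv_equiv track=rewrite | github.com/BlueEventHorizon/bw-cc-plugins | plugins/forge/scripts/skill_monitor.py | _has_list_structure
-- ===== SOURCE A (Python) =====
-- def _has_list_structure(content):
--     """YAML 内容がリスト構造を含むか判定する。
--
--     インデントされた "- " パターン（リスト要素）の有無で判定する。
--     トップレベルの "- " はインライン配列の可能性があるため除外。
--
--     Args:
--         content: YAML ファイルの内容
--
--     Returns:
--         bool: リスト構造を含む場合 True
--     """
--     for line in content.split("\n"):
--         if not line or line.startswith("#"):
--             continue
--         stripped = line.lstrip()
--         indent = len(line) - len(stripped)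
--         if indent >= 2 and stripped.startswith("- "):
--             return True
--     return False
-- ===== SOURCE B (Python) =====
-- import re
--
-- # B: one compiled multiline regex search over the whole content instead of the
-- # manual split("\n") loop with lstrip/len arithmetic.  The class [^\S\n] is
-- # "whitespace except newline" (exactly what lstrip strips within a line), so the
-- # pattern matches a line start, an indent of 2+ such characters, then "- ".
-- # Comment and blank lines can never match (no 2-char indent precedes "- ").
-- _INDENTED_ITEM = re.compile(r'^[^\S\n]{2,}- ', re.MULTILINE)
--
--
-- def _has_list_structure(content):
--     """YAML 内容がリスト構造を含むか判定する。"""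
--     return _INDENTED_ITEM.search(content) is not None
-- ===== Notes on version B (the rewrite author's own statement) =====
-- stated objective: idiomatic
-- what changed: Replaces the manual line-splitting loop with its per-line lstrip/length-difference indent computation and comment/blank-line guards by a single compiled multiline regex search for a line start, an indent of two or more non-newline whitespace characters, then a dash-space list marker.
import Mathlib
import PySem

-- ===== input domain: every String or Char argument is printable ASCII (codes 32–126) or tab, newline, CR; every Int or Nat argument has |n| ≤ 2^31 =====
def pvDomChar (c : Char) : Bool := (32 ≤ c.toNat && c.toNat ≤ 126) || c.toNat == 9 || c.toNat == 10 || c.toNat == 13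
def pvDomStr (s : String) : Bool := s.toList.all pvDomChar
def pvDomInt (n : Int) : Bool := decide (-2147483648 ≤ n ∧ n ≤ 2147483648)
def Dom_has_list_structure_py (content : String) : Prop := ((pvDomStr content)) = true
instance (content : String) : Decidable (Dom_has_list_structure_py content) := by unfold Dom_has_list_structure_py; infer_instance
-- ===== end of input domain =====

-- B replaces A's per-line split/lstrip loop by a single multiline regex search
-- (r'^[^\S\n]{2,}- ', idiomatic, same cost); return values proved equal on all inputs.

-- ===== PORT A =====
-- the for-loop over content.split("\n") with its early return
def pvA_loop : List String → Bool
  | [] => false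
  | line :: rest =>
    if line = "" ∨ PySem.Str.startswith line "#" = true then
      pvA_loop rest                     -- continue
    else
      let stripped := PySem.Str.lstrip line
      let indent := PySem.Str.len line - PySem.Str.len stripped
      if 2 ≤ indent ∧ PySem.Str.startswith stripped "- " = true then true
      else pvA_loop rest

def has_list_structure_py (content : String) : Bool :=
  pvA_loop ((PySem.Str.split? content "\n").getD [])

-- ===== PORT B =====
-- Hand port (exact on the domain) of re.search(r'^[^\S\n]{2,}- ', content, re.MULTILINE):
-- the regex is not a PySem primitive, so its semantics is transcribed step for step.

-- the character class [^\S\n]: a Python whitespace character other than '\n'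
def pvB_isWS (c : Char) : Bool := PySem.Chars.isspace c && !(c == '\n')

-- length of the run of [^\S\n]-characters at the current position
def pvB_wsRun : List Char → Nat
  | [] => 0
  | c :: cs => if pvB_isWS c then pvB_wsRun cs + 1 else 0

-- does the pattern match anchored here?  The greedy `[^\S\n]{2,}` followed by the
-- literal "- " succeeds (after backtracking) iff the whole class run has length ≥ 2
-- and is immediately followed by "- " ('-' is not in the class, so no shorter run helps).
def pvB_matchHere (cs : List Char) : Bool :=
  decide (2 ≤ pvB_wsRun cs) && ['-', ' '].isPrefixOf (cs.drop (pvB_wsRun cs))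

-- re.search scans positions left to right; with re.MULTILINE the anchor ^ holds at
-- position 0 and right after each '\n', so only those positions can start a match.
def pvB_scanFrom : Bool → List Char → Bool
  | anchor, [] => anchor && pvB_matchHere []
  | anchor, c :: rest => (anchor && pvB_matchHere (c :: rest)) || pvB_scanFrom (c == '\n') rest

def has_list_structure_py_alt (content : String) : Bool :=
  pvB_scanFrom true content.toList

-- ===== PRECONDITION & SPEC =====
def Spec_has_list_structure_py (content : String) (out : Bool) : Prop := out = has_list_structure_py_alt content
instance (content : String) (out : Bool) : Decidable (Spec_has_list_structure_py content out) := by unfold Spec_has_list_structure_py; infer_instance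

-- ===== CLAIM (what is proved, stated in full; the proofs are below) =====
def Claim_equal_has_list_structure_py : Prop := ∀ (content : String), Dom_has_list_structure_py content → Spec_has_list_structure_py content (has_list_structure_py content)

-- ===== LEMMAS AND PROOFS =====

-- the common skeleton: the list of lines of cs, split at every '\n'
def pvLines : List Char → List (List Char)
  | [] => [[]]
  | c :: cs => if c = '\n' then [] :: pvLines cs else (pvLines cs).modifyHead (c :: ·)

-- everything up to and including the next '\n' is discarded
def pvB_skipLine : List Char → List Char
  | [] => []
  | c :: cs => if c == '\n' then cs else pvB_skipLine cs

-- A's per-line body, on the character list of the line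
def pvA_check (l : List Char) : Bool :=
  if l = [] ∨ PySem.Chars.startswith l ['#'] = true then false
  else decide ((2 : Int) ≤ (l.length : Int) - ((PySem.Chars.lstrip l).length : Int))
        && PySem.Chars.startswith (PySem.Chars.lstrip l) ['-', ' ']

-- structure of pvLines: first line, then the lines after the first '\n' (if any)
theorem pvLines_decomp (cs : List Char) :
    pvLines cs = (cs.takeWhile (fun c => !(c == '\n')))
      :: (if '\n' ∈ cs then pvLines (pvB_skipLine cs) else []) := by
  induction cs with
  | nil => simp [pvLines]
  | cons c cs ih =>
    by_cases hc : c = '\n'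
    · subst hc; simp [pvLines, pvB_skipLine]
    · have hc' : ¬ '\n' = c := fun h => hc h.symm
      simp [pvLines, hc, hc', ih, pvB_skipLine, List.modifyHead, List.mem_cons]

theorem pvLines_ne_nil (cs : List Char) : pvLines cs ≠ [] := by
  rw [pvLines_decomp]; simp

-- no line contains '\n'
theorem pvLines_no_newline : ∀ cs, ∀ l ∈ pvLines cs, '\n' ∉ l := by
  intro cs
  induction cs with
  | nil =>
    intro l hl
    simp only [pvLines, List.mem_singleton] at hl
    subst hl; simp
  | cons c rest ih =>
    intro l hl
    by_cases hc : c = '\n'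
    · subst hc
      simp only [pvLines] at hl
      rcases List.mem_cons.mp hl with h | h
      · subst h; simp
      · exact ih l h
    · rcases List.exists_cons_of_ne_nil (pvLines_ne_nil rest) with ⟨h0, t0, hht⟩
      simp only [pvLines, hc, if_false, hht, List.modifyHead] at hl
      rcases List.mem_cons.mp hl with h | h
      · subst h
        have hh0 : '\n' ∉ h0 := ih h0 (by rw [hht]; exact List.mem_cons_self ..)
        intro hmem
        rcases List.mem_cons.mp hmem with h | h
        · exact hc h.symm
        · exact hh0 h
      · exact ih l (by rw [hht]; exact List.mem_cons_of_mem _ h)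

-- ----- the splitOn "\n" of port A computes pvLines -----
theorem pv_go_spec : ∀ (fuel : Nat) (l cur : List Char) (acc : List (List Char)),
    l.length ≤ fuel →
    PySem.Chars.splitOn.go ['\n'] fuel l cur acc
      = acc.reverse ++ (pvLines l).modifyHead (cur.reverse ++ ·) := by
  intro fuel
  induction fuel with
  | zero =>
    intro l cur acc hl
    have : l = [] := List.length_eq_zero_iff.mp (Nat.le_zero.mp hl)
    subst this
    simp [PySem.Chars.splitOn.go, pvLines]
  | succ fuel ih =>
    intro l cur acc hl
    cases l with
    | nil => simp [PySem.Chars.splitOn.go, pvLines]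
    | cons c rest =>
      simp only [List.length_cons, Nat.succ_le_succ_iff] at hl
      by_cases hc : c = '\n'
      · subst hc
        have hpre : List.isPrefixOf ['\n'] ('\n' :: rest) = true := by
          simp [List.isPrefixOf]
        simp only [PySem.Chars.splitOn.go, hpre, if_true, List.length_cons,
          List.length_nil, List.drop_succ_cons, List.drop_zero]
        rw [ih rest [] (cur.reverse :: acc) hl]
        cases hpl : pvLines rest <;> simp [pvLines, List.modifyHead, hpl]
      · have hc' : ¬ '\n' = c := fun h => hc h.symm
        have hpre : List.isPrefixOf ['\n'] (c :: rest) = false := by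
          simp [List.isPrefixOf, hc']
        simp only [PySem.Chars.splitOn.go, hpre, Bool.false_eq_true, if_false]
        rw [ih rest (c :: cur) acc hl]
        rcases List.exists_cons_of_ne_nil (pvLines_ne_nil rest) with ⟨h0, t0, hht⟩
        simp [pvLines, hc, hht, List.modifyHead]

theorem pv_splitOn_eq (cs : List Char) :
    PySem.Chars.splitOn cs ['\n'] = pvLines cs := by
  have h := pv_go_spec (cs.length + 1) cs [] [] (Nat.le_succ _)
  have hid : (pvLines cs).modifyHead (fun x => x) = pvLines cs := by
    cases h : pvLines cs <;> simp [List.modifyHead]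
  simpa [PySem.Chars.splitOn, hid] using h

-- ----- A's loop is an `any` over the lines -----
theorem pvA_loop_eq (ls : List (List Char)) :
    pvA_loop (ls.map String.ofList) = ls.any pvA_check := by
  induction ls with
  | nil => rfl
  | cons l rest ih =>
    have hlist : (String.ofList l).toList = l := by simp
    have hempty : (String.ofList l = "") ↔ (l = []) := by
      constructor
      · intro h; have := congrArg String.toList h; simpa [hlist] using this
      · intro h; subst h; rfl
    simp only [List.map_cons, pvA_loop, List.any_cons, pvA_check]
    by_cases h1 : l = [] ∨ PySem.Chars.startswith l ['#'] = true
    · have : String.ofList l = "" ∨ PySem.Str.startswith (String.ofList l) "#" = true := by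
        rcases h1 with h | h
        · exact Or.inl (hempty.mpr h)
        · right; simp only [PySem.Str.startswith, hlist]; exact h
      simp only [this, if_true, h1, if_true, Bool.false_or]
      exact ih
    · have h1' : ¬ (String.ofList l = "" ∨ PySem.Str.startswith (String.ofList l) "#" = true) := by
        intro hcon
        apply h1
        rcases hcon with h | h
        · exact Or.inl (hempty.mp h)
        · right; simpa [PySem.Str.startswith, hlist] using h
      simp only [h1', if_false, h1, if_false]
      have hl : PySem.Str.lstrip (String.ofList l) = String.ofList (PySem.Chars.lstrip l) := by
        apply String.ext
        simp [hlist]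
      rw [hl]
      have hlen : ∀ m : List Char, PySem.Str.len (String.ofList m) = (m.length : Int) := by
        intro m; simp [PySem.Str.len]
      have hsw : PySem.Str.startswith (String.ofList (PySem.Chars.lstrip l)) "- "
          = PySem.Chars.startswith (PySem.Chars.lstrip l) ['-', ' '] := by
        simp [PySem.Str.startswith]
      rw [hsw, hlen, hlen]
      by_cases h2 : (2 : Int) ≤ (l.length : Int) - ((PySem.Chars.lstrip l).length : Int)
          ∧ PySem.Chars.startswith (PySem.Chars.lstrip l) ['-', ' '] = true
      · simp [h2.1, h2.2]
      · rw [if_neg h2]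
        rcases Decidable.not_and_iff_not_or_not.mp h2 with h | h
        · simp [h, ih]
        · simp only [Bool.not_eq_true] at h
          simp [h, ih]

-- ----- per line (no '\n' inside): A's body equals B's anchored match -----
theorem pv_wsRun_le (l : List Char) : pvB_wsRun l ≤ l.length := by
  induction l with
  | nil => simp [pvB_wsRun]
  | cons c cs ih =>
    simp only [pvB_wsRun, List.length_cons]
    split
    · omega
    · omega

theorem pv_lstrip_eq_drop {l : List Char} (h : '\n' ∉ l) :
    PySem.Chars.lstrip l = l.drop (pvB_wsRun l) := by
  induction l with
  | nil => rfl
  | cons c cs ih =>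
    simp only [List.mem_cons, not_or] at h
    have hcn : ¬ c = '\n' := fun hh => h.1 hh.symm
    by_cases hs : PySem.Chars.isspace c = true
    · have hw : pvB_isWS c = true := by simp [pvB_isWS, hs, hcn]
      show List.dropWhile PySem.Chars.isspace (c :: cs) = _
      rw [List.dropWhile_cons, if_pos hs]
      simp only [pvB_wsRun, hw, if_true, List.drop_succ_cons]
      exact ih h.2
    · have hw : pvB_isWS c = false := by simp [pvB_isWS, hs]
      show List.dropWhile PySem.Chars.isspace (c :: cs) = _
      rw [List.dropWhile_cons, if_neg (by simpa using hs)]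
      simp [pvB_wsRun, hw]

theorem pvA_check_eq_matchHere {l : List Char} (h : '\n' ∉ l) :
    pvA_check l = pvB_matchHere l := by
  unfold pvA_check pvB_matchHere
  by_cases h1 : l = [] ∨ PySem.Chars.startswith l ['#'] = true
  · simp only [h1, if_true]
    rcases h1 with h1 | h1
    · subst h1; simp [pvB_wsRun]
    · rcases l with _ | ⟨c, rest⟩
      · simp [pvB_wsRun]
      · have hc : c = '#' := by
          have := (by simpa [PySem.Chars.startswith, List.isPrefixOf] using h1 : '#' = c)
          exact this.symm
        subst hc
        have hw : pvB_isWS '#' = false := by decide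
        simp [pvB_wsRun, hw, List.isPrefixOf]
  · simp only [h1, if_false]
    rw [pv_lstrip_eq_drop h]
    simp only [List.length_drop]
    have hle := pv_wsRun_le l
    have hiff : ((2 : Int) ≤ (l.length : Int) - ((l.length - pvB_wsRun l : Nat) : Int))
        ↔ 2 ≤ pvB_wsRun l := by omega
    simp [hiff, PySem.Chars.startswith]

-- ----- the anchored match only reads the first line -----
theorem pv_matchHere_takeWhile : ∀ (cs : List Char) (k : Nat),
    (decide (2 ≤ k + pvB_wsRun cs) && ['-', ' '].isPrefixOf (cs.drop (pvB_wsRun cs)))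
      = (decide (2 ≤ k + pvB_wsRun (cs.takeWhile (fun c => !(c == '\n'))))
          && ['-', ' '].isPrefixOf ((cs.takeWhile (fun c => !(c == '\n'))).drop
              (pvB_wsRun (cs.takeWhile (fun c => !(c == '\n')))))) := by
  intro cs
  induction cs with
  | nil => intro k; rfl
  | cons c rest ih =>
    intro k
    by_cases hn : c = '\n'
    · subst hn
      have hw : pvB_isWS '\n' = false := by decide
      have h1 : pvB_wsRun ('\n' :: rest) = 0 := by simp [pvB_wsRun, hw]
      rw [show ('\n' :: rest).takeWhile (fun c => !(c == '\n')) = [] from by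
        simp]
      simp [hw, pvB_wsRun, List.isPrefixOf]
    · by_cases hws : pvB_isWS c = true
      · have h2 : k + (pvB_wsRun (rest.takeWhile (fun c => !(c == '\n'))) + 1)
            = (k + 1) + pvB_wsRun (rest.takeWhile (fun c => !(c == '\n'))) := by omega
        have h3 : k + (pvB_wsRun rest + 1) = (k + 1) + pvB_wsRun rest := by omega
        have htw : (c :: rest).takeWhile (fun c => !(c == '\n'))
            = c :: rest.takeWhile (fun c => !(c == '\n')) := by
          simp [hn]
        have hwc : ∀ l : List Char, pvB_wsRun (c :: l) = pvB_wsRun l + 1 := fun l => by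
          simp [pvB_wsRun, hws]
        rw [htw, hwc, hwc, List.drop_succ_cons, List.drop_succ_cons, h2, h3]
        exact ih (k + 1)
      · have hws' : pvB_isWS c = false := by simpa using hws
        have hw0 : pvB_wsRun (c :: rest) = 0 := by simp [pvB_wsRun, hws']
        have htw : (c :: rest).takeWhile (fun c => !(c == '\n'))
            = c :: rest.takeWhile (fun c => !(c == '\n')) := by
          simp [hn]
        have hw0' : pvB_wsRun (c :: rest.takeWhile (fun c => !(c == '\n'))) = 0 := by
          simp [pvB_wsRun, hws']
        rw [htw, hw0, hw0', List.drop_zero, List.drop_zero]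
        congr 1
        by_cases hc : c = '-'
        · subst hc
          rcases rest with _ | ⟨d, rest'⟩
          · simp [List.isPrefixOf]
          · by_cases hd : d = '\n'
            · subst hd
              simp [List.isPrefixOf]
            · have htw2 : (d :: rest').takeWhile (fun c => !(c == '\n'))
                  = d :: rest'.takeWhile (fun c => !(c == '\n')) := by
                simp [hd]
              simp [List.isPrefixOf, htw2]
        · have hc' : ('-' == c) = false := beq_eq_false_iff_ne.mpr (fun hh => hc hh.symm)
          simp [List.isPrefixOf, hc']

-- ----- B's scan is the same `any` over the lines -----
theorem pv_scanFrom_eq : ∀ cs : List Char,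
    (pvB_scanFrom true cs = (pvLines cs).any pvB_matchHere)
    ∧ (pvB_scanFrom false cs
        = if '\n' ∈ cs then (pvLines (pvB_skipLine cs)).any pvB_matchHere else false) := by
  intro cs
  induction cs with
  | nil =>
    constructor
    · simp [pvB_scanFrom, pvLines, pvB_matchHere, pvB_wsRun]
    · simp [pvB_scanFrom]
  | cons c rest ih =>
    have hm : pvB_matchHere (c :: rest)
        = pvB_matchHere ((c :: rest).takeWhile (fun c => !(c == '\n'))) := by
      unfold pvB_matchHere
      simpa using pv_matchHere_takeWhile (c :: rest) 0
    constructor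
    · rw [pvLines_decomp (c :: rest)]
      simp only [List.any_cons, ← hm]
      by_cases hc : c = '\n'
      · subst hc
        simp [pvB_scanFrom, ih.1, pvB_skipLine]
      · have hc' : ¬ '\n' = c := fun hh => hc hh.symm
        have hbeq : (c == '\n') = false := beq_eq_false_iff_ne.mpr hc
        by_cases hmem : '\n' ∈ rest
        · simp [pvB_scanFrom, hbeq, hc', hmem, ih.2, pvB_skipLine]
        · simp [pvB_scanFrom, hbeq, hc', hmem, ih.2]
    · simp only [pvB_scanFrom, Bool.false_and, Bool.false_or]
      by_cases hc : c = '\n'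
      · subst hc
        simp [ih.1, pvB_skipLine]
      · have hc' : ¬ '\n' = c := fun hh => hc hh.symm
        have hbeq : (c == '\n') = false := beq_eq_false_iff_ne.mpr hc
        by_cases hmem : '\n' ∈ rest
        · simp [hbeq, hc', hmem, ih.2, pvB_skipLine, List.mem_cons]
        · simp [hbeq, hc', hmem, ih.2, List.mem_cons]

-- ===== VERDICT (by name: the statement is the Claim_ definition above) =====
theorem has_list_structure_py_spec : Claim_equal_has_list_structure_py := by
  intro content _
  unfold Spec_has_list_structure_py has_list_structure_py has_list_structure_py_alt
  have hsplit : (PySem.Str.split? content "\n").getD []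
      = (pvLines content.toList).map String.ofList := by
    simp [PySem.Str.split?, PySem.Chars.split?, pv_splitOn_eq,
      show "\n".toList = ['\n'] from rfl]
  rw [hsplit, pvA_loop_eq, (pv_scanFrom_eq content.toList).1]
  exact PySem.List.any_congr_mem
    (fun l hl => pvA_check_eq_matchHere (pvLines_no_newline content.toList l hl))
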